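-- pv_equiv track=rewrite | github.com/jamesctaggart/endonuclease_specificity | rny_mpra/mutscan/sequtils.py | make_all_double_mutations
-- ===== SOURCE A (Python) =====
-- def make_all_double_mutations(seq, start_idx = None, end_idx = None):
--
--     double_mut_list = []
--
--     for i, c1 in enumerate(seq.upper()):
--         for n1 in ['A', 'T', 'C', 'G']:
--             if c1 != n1:
--                 for j, c2 in enumerate(seq.upper()):
--                     if i!=j:
--                         for n2 in ['A', 'T', 'C', 'G']:
--                             if c2 != n2:
--                                 if start_idx is not None:
--                                     if i<start_idx or j<start_idx:
--                                         continue
--                                 if end_idx is not None: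
--                                     if i>end_idx or j>end_idx:
--                                         continue
--                                 double_mut_list.append(c1 + '-' + str(i) + '-' + n1 + '_' + c2 + '-' + str(j) + '-' + n2)
--
--     return double_mut_list
-- ===== SOURCE B (Python) =====
-- def make_all_double_mutations(seq, start_idx=None, end_idx=None):
--     u = seq.upper()
--     groups = []
--     for i, c in enumerate(u):
--         if (start_idx is None or i >= start_idx) and (end_idx is None or i <= end_idx):
--             groups.append([c + '-' + str(i) + '-' + n for n in 'ATCG' if c != n])
--     out = []
--     before = []                              # fragments of groups already passed, flattened
--     rest = [s for g in groups for s in g]    # fragments of groups not yet passed, flattened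
--     for g in groups:
--         rest = rest[len(g):]                 # drop this group's own fragments
--         others = before + rest               # everything at a different position
--         out += [f + '_' + s for f in g for s in others]
--         before += g
--     return out
-- ===== Notes on version B (the rewrite author's own statement) =====
-- stated objective: faster
-- what changed: B builds one fragment-list per in-range position once, then emits pairs by walking the groups while maintaining a flattened prefix and shrinking flattened suffix of partner fragments, so A's per-leaf i!=j comparison, per-leaf range guards and per-leaf label re-concatenation from six pieces disappear.
import Mathlib
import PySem

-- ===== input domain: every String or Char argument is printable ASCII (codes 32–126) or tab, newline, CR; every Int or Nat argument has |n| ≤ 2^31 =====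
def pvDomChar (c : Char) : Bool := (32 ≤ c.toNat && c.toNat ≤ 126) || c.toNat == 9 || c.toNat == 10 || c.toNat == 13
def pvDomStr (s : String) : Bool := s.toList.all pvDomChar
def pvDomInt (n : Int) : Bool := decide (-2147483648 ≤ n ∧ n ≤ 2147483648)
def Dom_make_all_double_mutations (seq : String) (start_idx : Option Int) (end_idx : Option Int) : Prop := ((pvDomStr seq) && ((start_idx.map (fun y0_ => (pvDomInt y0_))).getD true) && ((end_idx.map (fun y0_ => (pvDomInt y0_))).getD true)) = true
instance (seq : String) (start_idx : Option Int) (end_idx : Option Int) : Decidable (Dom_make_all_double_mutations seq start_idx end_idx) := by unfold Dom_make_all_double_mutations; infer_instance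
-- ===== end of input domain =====

-- B builds per-position fragment groups once and pairs each group against a growing flattened
-- prefix and shrinking flattened suffix, with no per-pair index comparison or range guard
-- (objective: faster, measured); return values proved equal on all inputs.

-- ===== PORT A =====
-- c1 + '-' + str(i) + '-' + n1 + '_' + c2 + '-' + str(j) + '-' + n2
def pvLabel (c1 : Char) (i : Int) (n1 : Char) (c2 : Char) (j : Int) (n2 : Char) : String :=
  String.ofList [c1] ++ "-" ++ PySem.Int.toStr i ++ "-" ++ String.ofList [n1] ++ "_" ++
  String.ofList [c2] ++ "-" ++ PySem.Int.toStr j ++ "-" ++ String.ofList [n2]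

def make_all_double_mutations (seq : String) (start_idx : Option Int) (end_idx : Option Int) : List String :=
  (PySem.List.enumerate (PySem.Str.upper seq).toList).foldl (fun acc p =>
    (['A', 'T', 'C', 'G']).foldl (fun acc n1 =>
      if p.2 ≠ n1 then
        (PySem.List.enumerate (PySem.Str.upper seq).toList).foldl (fun acc q =>
          if p.1 ≠ q.1 then
            (['A', 'T', 'C', 'G']).foldl (fun acc n2 =>
              if q.2 ≠ n2 then
                -- the two 'continue' guards, in A's order
                if (match start_idx with
                    | some v => decide (p.1 < v) || decide (q.1 < v)
                    | none => false) then acc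
                else if (match end_idx with
                    | some v => decide (p.1 > v) || decide (q.1 > v)
                    | none => false) then acc
                else acc ++ [pvLabel p.2 p.1 n1 q.2 q.1 n2]
              else acc) acc
          else acc) acc
      else acc) acc) []

-- ===== PORT B =====
-- index-range test: (start_idx is None or i >= start_idx) and (end_idx is None or i <= end_idx)
def pvOk (start_idx end_idx : Option Int) (i : Int) : Bool :=
  (match start_idx with | none => true | some v => decide (v ≤ i)) &&
  (match end_idx with | none => true | some v => decide (i ≤ v))

-- c + '-' + str(i) + '-' + n
def pvFrag (c : Char) (i : Int) (n : Char) : String :=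
  String.ofList [c] ++ "-" ++ PySem.Int.toStr i ++ "-" ++ String.ofList [n]

-- the `groups` loop of B: one fragment list per in-range position
def pvGroups (seq : String) (start_idx end_idx : Option Int) : List (List String) :=
  (PySem.List.enumerate (PySem.Str.upper seq).toList).foldl (fun acc p =>
    if pvOk start_idx end_idx p.1 then
      acc ++ [("ATCG".toList.filter (fun n => p.2 ≠ n)).map (fun n => pvFrag p.2 p.1 n)]
    else acc) []

def make_all_double_mutations_alt (seq : String) (start_idx : Option Int) (end_idx : Option Int) : List String :=
  let groups := pvGroups seq start_idx end_idx
  -- state: (out, before, rest); rest[len(g):] is a nonnegative-start slice, exactly List.drop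
  (groups.foldl (fun st g =>
    let rest := st.2.2.drop g.length
    let others := st.2.1 ++ rest
    (st.1 ++ g.flatMap (fun f => others.map (fun s2 => f ++ "_" ++ s2)), st.2.1 ++ g, rest))
    ([], [], groups.flatMap id)).1

-- ===== PRECONDITION & SPEC =====
def Spec_make_all_double_mutations (seq : String) (start_idx : Option Int) (end_idx : Option Int) (out : List String) : Prop := out = make_all_double_mutations_alt seq start_idx end_idx
instance (seq : String) (start_idx : Option Int) (end_idx : Option Int) (out : List String) : Decidable (Spec_make_all_double_mutations seq start_idx end_idx out) := by unfold Spec_make_all_double_mutations; infer_instance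

-- ===== CLAIM (what is proved, stated in full; the proofs are below) =====
def Claim_equal_make_all_double_mutations : Prop := ∀ (seq : String) (start_idx : Option Int) (end_idx : Option Int), Dom_make_all_double_mutations seq start_idx end_idx → Spec_make_all_double_mutations seq start_idx end_idx (make_all_double_mutations seq start_idx end_idx)

-- ===== LEMMAS AND PROOFS =====
-- generic: a foldl whose body extends the accumulator is acc ++ flatMap
theorem pv_foldl_extend {α β : Type} (l : List α) (f : List β → α → List β) (g : α → List β)
    (h : ∀ acc x, f acc x = acc ++ g x) : ∀ acc, l.foldl f acc = acc ++ l.flatMap g := by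
  induction l with
  | nil => intro acc; simp
  | cons x xs ih => intro acc; simp [List.foldl_cons, h, ih, List.flatMap_cons, List.append_assoc]

theorem pv_foldl_if {α β : Type} (l : List α) (c : α → Prop) [DecidablePred c]
    (F : α → List β) (acc : List β) :
    l.foldl (fun acc x => if c x then acc ++ F x else acc) acc
      = acc ++ l.flatMap (fun x => if c x then F x else []) :=
  pv_foldl_extend l _ _ (by intro acc x; split_ifs <;> simp) acc

theorem pv_lvl4 (c2 : Char) (bS bE : Bool) (lbl : Char → String) (acc : List String) :
    (['A', 'T', 'C', 'G']).foldl (fun acc n2 =>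
        if c2 ≠ n2 then (if bS then acc else if bE then acc else acc ++ [lbl n2]) else acc) acc
      = acc ++ (['A', 'T', 'C', 'G']).flatMap (fun n2 =>
          if c2 ≠ n2 then (if bS then [] else if bE then [] else [lbl n2]) else []) :=
  pv_foldl_extend _ _ _ (by intro acc x; split_ifs <;> simp) acc

theorem pv_fm_congr {α β : Type} (l : List α) {f g : α → List β} (h : ∀ x, f x = g x) :
    l.flatMap f = l.flatMap g := congrArg (fun f => List.flatMap f l) (funext h)

theorem pv_fm_congr_mem {α β : Type} (l : List α) {f g : α → List β}
    (h : ∀ x ∈ l, f x = g x) : l.flatMap f = l.flatMap g := by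
  induction l with
  | nil => rfl
  | cons x xs ih =>
    simp only [List.flatMap_cons, h x (List.mem_cons_self), ih (fun y hy => h y (List.mem_cons_of_mem _ hy))]

theorem pv_flatMap_filter {α β : Type} (l : List α) (p : α → Bool) (f : α → List β) :
    (l.filter p).flatMap f = l.flatMap (fun x => if p x then f x else []) := by
  induction l with
  | nil => rfl
  | cons x xs ih => by_cases h : p x <;> simp [h, ih]

theorem pv_flatMap_single_if {α β : Type} (l : List α) (c : α → Prop) [DecidablePred c] (f : α → β) :
    l.flatMap (fun x => if c x then [f x] else []) = (l.filter (fun x => c x)).map f := by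
  induction l with
  | nil => rfl
  | cons x xs ih => by_cases h : c x <;> simp [h, ih]

theorem pv_fm_nil {α β : Type} (l : List α) {f : α → List β} (h : ∀ x, f x = []) :
    l.flatMap f = [] := by rw [pv_fm_congr l h]; simp

-- A's two 'continue' guards collapse to the range test on both positions
theorem pv_guard (s e : Option Int) (i j : Int) (L : List String) :
    (if (match s with | some v => decide (i < v) || decide (j < v) | none => false) then ([] : List String)
     else if (match e with | some v => decide (i > v) || decide (j > v) | none => false) then []
     else L) = if pvOk s e i && pvOk s e j then L else [] := by
  rcases s with _ | v <;> rcases e with _ | w <;>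
    simp only [pvOk, Bool.and_eq_true, Bool.or_eq_true, decide_eq_true_eq, Bool.true_and,
      Bool.and_true, Bool.false_eq_true, if_false] <;>
    split_ifs <;> first | rfl | omega

-- per-position fragment list and the keyed group table shared by both proofs
def pvFrags (p : Int × Char) : List String :=
  (['A', 'T', 'C', 'G'].filter (fun n => p.2 ≠ n)).map (fun n => pvFrag p.2 p.1 n)

def pvKG (seq : String) (s e : Option Int) : List (Int × List String) :=
  ((PySem.List.enumerate (PySem.Str.upper seq).toList).filter (fun p => pvOk s e p.1)).map
    (fun p => (p.1, pvFrags p))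

def pvMid (seq : String) (s e : Option Int) : List String :=
  (pvKG seq s e).flatMap (fun g => g.2.flatMap (fun f =>
    ((pvKG seq s e).flatMap (fun g' => if g.1 ≠ g'.1 then g'.2 else [])).map
      (fun s2 => f ++ "_" ++ s2)))

theorem pv_label_frag (c1 : Char) (i : Int) (n1 : Char) (c2 : Char) (j : Int) (n2 : Char) :
    pvLabel c1 i n1 c2 j n2 = pvFrag c1 i n1 ++ "_" ++ pvFrag c2 j n2 := by
  simp [pvLabel, pvFrag, String.append_assoc]

theorem pv_kg_pairwise (seq : String) (s e : Option Int) :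
    (pvKG seq s e).Pairwise (fun a b => a.1 ≠ b.1) := by
  unfold pvKG
  apply List.Pairwise.map
  · intro a b (h : a.1 < b.1); exact ne_of_lt h
  · exact (PySem.List.pairwise_lt_enumerate _ _).filter _


-- ===== A = Mid =====
theorem pv_A_norm (seq : String) (s e : Option Int) :
    make_all_double_mutations seq s e =
    (PySem.List.enumerate (PySem.Str.upper seq).toList).flatMap (fun p =>
      (['A', 'T', 'C', 'G']).flatMap (fun n1 =>
        if p.2 ≠ n1 then
          (PySem.List.enumerate (PySem.Str.upper seq).toList).flatMap (fun q =>
            if p.1 ≠ q.1 then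
              (['A', 'T', 'C', 'G']).flatMap (fun n2 =>
                if q.2 ≠ n2 then
                  if (match s with | some v => decide (p.1 < v) || decide (q.1 < v) | none => false) then []
                  else if (match e with | some v => decide (p.1 > v) || decide (q.1 > v) | none => false) then []
                  else [pvLabel p.2 p.1 n1 q.2 q.1 n2]
                else []) else []) else [])) := by
  unfold make_all_double_mutations
  simp only [pv_lvl4, pv_foldl_if, pv_foldl_extend _ _ _ (fun _ _ => rfl)]
  simp only [List.nil_append]

theorem pv_mid_expand (seq : String) (s e : Option Int) :
    pvMid seq s e =
    (PySem.List.enumerate (PySem.Str.upper seq).toList).flatMap (fun p =>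
      if pvOk s e p.1 then
        (pvFrags p).flatMap (fun f =>
          (PySem.List.enumerate (PySem.Str.upper seq).toList).flatMap (fun q =>
            if pvOk s e q.1 then
              (if p.1 ≠ q.1 then pvFrags q else []).map (fun s2 => f ++ "_" ++ s2)
            else []))
      else []) := by
  unfold pvMid pvKG
  rw [List.flatMap_map, pv_flatMap_filter]
  apply pv_fm_congr; intro p
  by_cases hp : pvOk s e p.1 = true
  · simp only [hp, if_true]
    apply pv_fm_congr; intro f
    rw [List.map_flatMap, List.flatMap_map, pv_flatMap_filter]
  · have hp' : pvOk s e p.1 = false := by simpa using hp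
    simp only [hp', Bool.false_eq_true, if_false]

theorem pv_A_mid (seq : String) (s e : Option Int) :
    make_all_double_mutations seq s e = pvMid seq s e := by
  rw [pv_A_norm, pv_mid_expand]
  apply pv_fm_congr; intro p
  by_cases hp : pvOk s e p.1 = true
  · rw [if_pos hp]
    unfold pvFrags
    rw [List.flatMap_map, pv_flatMap_filter]
    simp only [decide_eq_true_eq]
    apply pv_fm_congr; intro n1
    by_cases h1 : p.2 ≠ n1
    · rw [if_pos h1, if_pos h1]
      apply pv_fm_congr; intro q
      by_cases hq : pvOk s e q.1 = true
      · by_cases hij : p.1 ≠ q.1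
        · rw [if_pos hij]
          simp only [hq, if_true, if_pos hij]
          rw [List.map_map]
          rw [pv_fm_congr (['A','T','C','G']) (g := fun n2 =>
              if q.2 ≠ n2 then [pvLabel p.2 p.1 n1 q.2 q.1 n2] else []) (fun n2 => by
            by_cases h2 : q.2 ≠ n2
            · simp only [if_pos h2, pv_guard, hp, hq]; simp
            · simp [h2])]
          rw [pv_flatMap_single_if]
          have hfun : pvLabel p.2 p.1 n1 q.2 q.1 =
              ((fun s2 => pvFrag p.2 p.1 n1 ++ "_" ++ s2) ∘ (fun n => pvFrag q.2 q.1 n)) :=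
            funext fun n2 => pv_label_frag _ _ _ _ _ _
          rw [hfun]
        · rw [if_neg hij]
          simp only [hq, if_true, if_neg hij, List.map_nil]
      · have hq' : pvOk s e q.1 = false := by simpa using hq
        by_cases hij : p.1 ≠ q.1
        · rw [if_pos hij]
          simp only [hq', Bool.false_eq_true, if_false]
          apply pv_fm_nil; intro n2
          by_cases h2 : q.2 ≠ n2
          · rw [if_pos h2, pv_guard, hq']; simp
          · rw [if_neg h2]
        · rw [if_neg hij]
          simp only [hq', Bool.false_eq_true, if_false]
    · rw [if_neg h1, if_neg h1]
  · rw [if_neg hp]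
    have hp' : pvOk s e p.1 = false := by simpa using hp
    apply pv_fm_nil; intro n1
    by_cases h1 : p.2 ≠ n1
    · rw [if_pos h1]
      apply pv_fm_nil; intro q
      by_cases hij : p.1 ≠ q.1
      · rw [if_pos hij]
        apply pv_fm_nil; intro n2
        by_cases h2 : q.2 ≠ n2
        · rw [if_pos h2, pv_guard, hp']; simp
        · rw [if_neg h2]
      · rw [if_neg hij]
    · rw [if_neg h1]

-- ===== B = Mid =====

-- recursive specification of B's pairing loop
def pvSpecRec : List String → List (List String) → List String
  | _, [] => []
  | pre, g :: rest =>
      g.flatMap (fun f => (pre ++ rest.flatMap id).map (fun s2 => f ++ "_" ++ s2)) ++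
      pvSpecRec (pre ++ g) rest

theorem pv_B_loop (gs : List (List String)) : ∀ (out pre : List String),
    (gs.foldl (fun st g =>
      let rest := st.2.2.drop g.length
      let others := st.2.1 ++ rest
      ((st.1 ++ g.flatMap (fun f => others.map (fun s2 => f ++ "_" ++ s2)) : List String),
        st.2.1 ++ g, rest))
      (out, pre, gs.flatMap id)).1 = out ++ pvSpecRec pre gs := by
  induction gs with
  | nil => intro out pre; simp [pvSpecRec]
  | cons g rest ih =>
    intro out pre
    simp only [List.foldl_cons, List.flatMap_cons, id]
    rw [List.drop_left]
    rw [ih]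
    simp [pvSpecRec, List.append_assoc]

theorem pv_main (F : List (Int × List String)) (hF : F.Pairwise (fun a b => a.1 ≠ b.1)) :
    ∀ (cur pre : List (Int × List String)), F = pre ++ cur →
    pvSpecRec (pre.flatMap (fun g => g.2)) (cur.map (fun g => g.2)) =
    cur.flatMap (fun g => g.2.flatMap (fun f =>
      (F.flatMap (fun g' => if g.1 ≠ g'.1 then g'.2 else [])).map (fun s2 => f ++ "_" ++ s2))) := by
  intro cur
  induction cur with
  | nil => intro pre _; simp [pvSpecRec]
  | cons g rest ih =>
    intro pre hsplit
    simp only [List.map_cons, pvSpecRec, List.flatMap_cons]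
    have hkey : F.flatMap (fun g' => if g.1 ≠ g'.1 then g'.2 else []) =
        pre.flatMap (fun g => g.2) ++ rest.flatMap (fun g => g.2) := by
      rw [hsplit, List.flatMap_append, List.flatMap_cons, if_neg (by simp)]
      rw [hsplit] at hF
      rw [List.pairwise_append] at hF
      obtain ⟨_, hmid, hcross⟩ := hF
      rw [List.pairwise_cons] at hmid
      congr 1
      · exact pv_fm_congr_mem _ (fun a ha => by
          rw [if_pos (Ne.symm (hcross a ha g List.mem_cons_self))])
      · rw [List.nil_append]
        exact pv_fm_congr_mem _ (fun b hb => by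
          rw [if_pos (hmid.1 b hb)])
    have hrest : (rest.map (fun g => g.2)).flatMap id = rest.flatMap (fun g => g.2) := by
      rw [List.flatMap_map]; rfl
    rw [hrest, hkey]
    congr 1
    have := ih (pre ++ [g]) (by rw [hsplit]; simp)
    rw [List.flatMap_append] at this
    simpa using this

theorem pv_groups_eq (seq : String) (s e : Option Int) :
    pvGroups seq s e = (pvKG seq s e).map (fun g => g.2) := by
  unfold pvGroups pvKG
  rw [pv_foldl_if, List.nil_append, List.map_map]
  rw [pv_flatMap_single_if]
  simp [pvFrags, Function.comp]

theorem pv_B_mid (seq : String) (s e : Option Int) :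
    make_all_double_mutations_alt seq s e = pvMid seq s e := by
  unfold make_all_double_mutations_alt
  rw [pv_groups_eq]
  rw [pv_B_loop]
  rw [List.nil_append]
  have := pv_main (pvKG seq s e) (pv_kg_pairwise seq s e) (pvKG seq s e) [] (by simp)
  simpa [pvMid] using this

-- ===== VERDICT (by name: the statement is the Claim_ definition above) =====
theorem make_all_double_mutations_spec : Claim_equal_make_all_double_mutations := by
  intro seq s e _
  unfold Spec_make_all_double_mutations
  rw [pv_A_mid, pv_B_mid]
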